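-- pv_equiv track=rewrite | github.com/VascoSch92/symmetria | symmetria/elements.py | _validate_and_standardize
-- ===== SOURCE A (Python) =====
-- from typing import Dict, List, Union, Tuple, Set, Iterable, Any
--
-- def _validate_and_standardize(cycle: Tuple[int, ...]) -> Tuple[int, ...]:
--     """
--     Private method to validate and standardize a set of integers to form a cycle.
--     A tuple is eligible to be a cycle if it contains only strictly positive integers.
--     The standard form for a cycle is the (unique) one where the first element is the smallest.
--     """
--     for element in cycle:
--         if isinstance(element, int) is False:
--             raise ValueError(f"Expected `int` type, but got {type(element)}.")
--         if element < 1: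
--             raise ValueError(f"Expected all strictly positive values, but got {element}.")
--
--     smallest_element_index = cycle.index(min(cycle))
--     if smallest_element_index == 0:
--         return tuple(cycle)
--     return cycle[smallest_element_index:] + cycle[:smallest_element_index]
-- ===== SOURCE B (Python) =====
-- def _validate_and_standardize(cycle):
--     """Validate, then rotate one step at a time until the head is a global minimum."""
--     for element in cycle:
--         if isinstance(element, int) is False:
--             raise ValueError(f"Expected `int` type, but got {type(element)}.")
--         if element < 1:
--             raise ValueError(f"Expected all strictly positive values, but got {element}.")
--     rest = tuple(cycle)
--     for _ in range(len(rest)):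
--         if all(rest[0] <= x for x in rest[1:]):
--             return rest
--         rest = rest[1:] + rest[:1]
--     return rest
-- ===== Notes on version B (the rewrite author's own statement) =====
-- stated objective: alternative
-- what changed: Instead of computing min() and its index and slicing once, B repeatedly rotates the tuple left by one step until the head is <= every other element, which stops exactly at the first occurrence of the minimum.
-- outside the precondition, e.g. on _validate_and_standardize(()): A raises ValueError, B returns ()
import Mathlib
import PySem

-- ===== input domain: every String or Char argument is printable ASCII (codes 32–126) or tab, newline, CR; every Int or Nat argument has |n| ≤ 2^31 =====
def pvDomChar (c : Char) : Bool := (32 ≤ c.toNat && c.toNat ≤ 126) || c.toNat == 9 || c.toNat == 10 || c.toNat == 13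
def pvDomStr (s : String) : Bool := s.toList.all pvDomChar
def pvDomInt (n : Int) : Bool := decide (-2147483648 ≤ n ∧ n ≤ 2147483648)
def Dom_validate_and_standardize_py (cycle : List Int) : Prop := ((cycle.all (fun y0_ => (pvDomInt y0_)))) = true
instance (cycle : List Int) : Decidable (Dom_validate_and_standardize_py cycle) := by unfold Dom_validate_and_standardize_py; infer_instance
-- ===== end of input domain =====

-- B replaces min()+index()+slicing by repeated one-step rotations until the head is a
-- global minimum; equal output on all inputs where A returns (Pre_).

-- ===== PORT A =====
-- A's validation loop raises ValueError on a non-int or an element < 1; all ints here, and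
-- elements < 1 are excluded by Pre_, so the loop has no effect inside Pre_.
def validate_and_standardize_py (cycle : List Int) : List Int :=
  match PySem.List.min? cycle (fun x => x) with
  | none => []          -- Python min of an empty sequence raises ValueError; excluded by Pre_
  | some m =>
    match PySem.List.index? cycle m with
    | none => []        -- unreachable: the min is a member
    | some i =>
      if i = 0 then cycle
      else PySem.List.slice cycle (some (i : Int)) none ++
           PySem.List.slice cycle none (some (i : Int))

-- ===== PORT B =====
-- B's rotation loop: `for _ in range(len(rest))`, so the fuel is the length.
def pvRotLoop : Nat → List Int → List Int
  | 0, rest => rest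
  | n + 1, rest =>
    match rest with
    | [] => []          -- unreachable with fuel > 0: rest[0] in Python would raise
    | h :: t =>
      if t.all (fun x => h ≤ x) then h :: t
      else pvRotLoop n (PySem.List.slice (h :: t) (some 1) none ++
                        PySem.List.slice (h :: t) none (some 1))

def validate_and_standardize_py_alt (cycle : List Int) : List Int :=
  pvRotLoop cycle.length cycle

-- ===== PRECONDITION & SPEC =====
-- A raises ValueError on the empty tuple (min(())) and on any element below 1; Pre_ excludes exactly those.
def Pre_validate_and_standardize_py (cycle : List Int) : Prop :=
  cycle ≠ [] ∧ ∀ x ∈ cycle, 1 ≤ x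
instance (cycle : List Int) : Decidable (Pre_validate_and_standardize_py cycle) := by
  unfold Pre_validate_and_standardize_py; infer_instance
def pvWitness_validate_and_standardize_py : List Int := [2, 1, 3]

def Spec_validate_and_standardize_py (cycle : List Int) (out : List Int) : Prop := out = validate_and_standardize_py_alt cycle
instance (cycle : List Int) (out : List Int) : Decidable (Spec_validate_and_standardize_py cycle out) := by unfold Spec_validate_and_standardize_py; infer_instance

-- ===== CLAIM (what is proved, stated in full; the proofs are below) =====
def Claim_equal_validate_and_standardize_py : Prop := ∀ (cycle : List Int), Dom_validate_and_standardize_py cycle → Pre_validate_and_standardize_py cycle → Spec_validate_and_standardize_py cycle (validate_and_standardize_py cycle)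

-- ===== LEMMAS AND PROOFS =====

-- running foldl-min is ≤ its initial value
theorem pv_foldl_min_le_init : ∀ (xs : List Int) (b : Int), xs.foldl min b ≤ b := by
  intro xs
  induction xs with
  | nil => intro b; simp
  | cons x xs ih =>
    intro b
    exact le_trans (ih (min b x)) (min_le_left _ _)

-- running foldl-min is ≤ every member
theorem pv_foldl_min_le_mem : ∀ (xs : List Int) (b x : Int), x ∈ xs → xs.foldl min b ≤ x := by
  intro xs
  induction xs with
  | nil => intro b x h; simp at h
  | cons y ys ih =>
    intro b x h
    rcases List.mem_cons.mp h with h1 | h1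
    · subst h1
      exact le_trans (pv_foldl_min_le_init ys (min b x)) (min_le_right _ _)
    · exact ih (min b y) x h1

-- pull the initial value out of a foldl-min
theorem pv_foldl_min_pull : ∀ (l : List Int) (a b : Int),
    List.foldl min (min a b) l = min a (List.foldl min b l) := by
  intro l
  induction l with
  | nil => intro a b; simp
  | cons x xs ih =>
    intro a b
    simp only [List.foldl_cons, min_assoc, ih]

theorem pv_idxOf?_of_mem {v : Int} : ∀ {xs : List Int}, v ∈ xs → List.idxOf? v xs = some (xs.idxOf v) := by
  intro xs
  induction xs with
  | nil => intro h; simp at h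
  | cons x xs ih =>
    intro h
    by_cases hx : x = v
    · subst hx; simp [List.idxOf?_cons]
    · have hv : v ∈ xs := by
        rcases List.mem_cons.mp h with h1 | h1
        · exact absurd h1.symm hx
        · exact h1
      simp [List.idxOf?_cons, hx, ih hv]

-- first index is unchanged by appending, when the value occurs in the prefix
theorem pv_idxOf_append_of_mem {v : Int} : ∀ (l t : List Int), v ∈ l → (l ++ t).idxOf v = l.idxOf v := by
  intro l t
  induction l with
  | nil => intro h; simp at h
  | cons x xs ih =>
    intro h
    by_cases hx : x = v
    · subst hx; simp
    · have hv : v ∈ xs := by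
        rcases List.mem_cons.mp h with h1 | h1
        · exact absurd h1.symm hx
        · exact h1
      have hbe : (x == v) = false := by simp [hx]
      simp [List.idxOf_cons, hbe, ih hv]

-- the rotation loop reaches the first occurrence of the minimum and returns that rotation
theorem pvRotLoop_eq : ∀ (fuel : Nat) (h : Int) (t : List Int),
    (h :: t).idxOf (t.foldl min h) < fuel →
    pvRotLoop fuel (h :: t) =
      (h :: t).drop ((h :: t).idxOf (t.foldl min h)) ++
      (h :: t).take ((h :: t).idxOf (t.foldl min h)) := by
  intro fuel
  induction fuel with
  | zero => intro h t hlt; omega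
  | succ n ih =>
    intro h t hlt
    have hle : t.foldl min h ≤ h := pv_foldl_min_le_init t h
    by_cases hmin : h = t.foldl min h
    · -- head is the minimum: index 0, the loop stops immediately
      have hall : t.all (fun x => h ≤ x) = true := by
        rw [List.all_eq_true]
        intro x hx
        rw [decide_eq_true_iff, hmin]
        exact pv_foldl_min_le_mem t h x hx
      have hidx : (h :: t).idxOf (t.foldl min h) = 0 := by
        simp [← hmin]
      simp [pvRotLoop, hall, hidx]
    · -- head is not the minimum: the minimum lies in t strictly below h; rotate once
      have hm_mem : t.foldl min h ∈ h :: t := by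
        have := PySem.List.min?_mem (xs := h :: t) (key := fun x => x)
          (m := t.foldl min h) (by rw [PySem.List.min?_id_cons])
        exact this
      have hmem : t.foldl min h ∈ t := by
        rcases List.mem_cons.mp hm_mem with h1 | h1
        · exact absurd h1.symm hmin
        · exact h1
      have hstrict : t.foldl min h < h := lt_of_le_of_ne hle (fun e => hmin e.symm)
      have hall : t.all (fun x => h ≤ x) = false := by
        rw [List.all_eq_false]
        exact ⟨t.foldl min h, hmem, by simp; omega⟩
      -- t is nonempty
      match t with
      | [] => simp at hmem
      | h₂ :: t₂ =>
        have hbe : (h == List.foldl min h (h₂ :: t₂)) = false := by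
          simp only [beq_eq_false_iff_ne, ne_eq]; exact hmin
        have hidx : (h :: h₂ :: t₂).idxOf ((h₂ :: t₂).foldl min h) =
            (h₂ :: t₂).idxOf ((h₂ :: t₂).foldl min h) + 1 := by
          simp only [List.idxOf_cons, hbe, cond_false]
        -- the minimum of the rotated list equals the minimum of the original
        have hm' : (t₂ ++ [h]).foldl min h₂ = (h₂ :: t₂).foldl min h := by
          rw [List.foldl_append]
          simp only [List.foldl_cons, List.foldl_nil]
          have := pv_foldl_min_pull t₂ h h₂
          rw [min_comm (List.foldl min h₂ t₂) h, ← this]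
        -- the first index in the rotated list is one less
        have hidx' : (h₂ :: t₂ ++ [h]).idxOf ((t₂ ++ [h]).foldl min h₂) =
            (h₂ :: t₂).idxOf ((h₂ :: t₂).foldl min h) := by
          rw [hm']
          exact pv_idxOf_append_of_mem (h₂ :: t₂) [h] hmem
        have hfuel : (h₂ :: (t₂ ++ [h])).idxOf ((t₂ ++ [h]).foldl min h₂) < n := by
          have : (h₂ :: (t₂ ++ [h])) = (h₂ :: t₂) ++ [h] := by simp
          rw [this, hidx']
          omega
        have hslice : PySem.List.slice (h :: h₂ :: t₂) (some 1) none ++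
            PySem.List.slice (h :: h₂ :: t₂) none (some 1) = (h₂ :: t₂) ++ [h] := by
          rw [PySem.List.slice_from_one]
          have h1 : (1 : Int) = ((1 : Nat) : Int) := by norm_num
          rw [h1, PySem.List.slice_to_natCast]
          simp
        simp only [pvRotLoop, hall, Bool.false_eq_true, if_false, hslice]
        have hrec := ih h₂ (t₂ ++ [h]) (by simpa using hfuel)
        rw [show (h₂ :: t₂) ++ [h] = h₂ :: (t₂ ++ [h]) by simp, hrec]
        -- rewrite both sides as drop/take of the same index
        rw [show (h₂ :: (t₂ ++ [h])) = (h₂ :: t₂) ++ [h] by simp, hidx', hidx]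
        set j := (h₂ :: t₂).idxOf ((h₂ :: t₂).foldl min h) with hj
        have hjlen : j < (h₂ :: t₂).length := by
          rw [hj]
          exact List.idxOf_lt_length_of_mem (by rw [← hm']; rw [hm']; exact hmem)
        rw [List.drop_append_of_le_length (by omega), List.take_append_of_le_length (by omega)]
        simp [List.append_assoc]

-- ===== VERDICT (by name: the statement is the Claim_ definition above) =====
theorem validate_and_standardize_py_spec : Claim_equal_validate_and_standardize_py := by
  unfold Claim_equal_validate_and_standardize_py
  intro cycle _ hpre
  unfold Spec_validate_and_standardize_py
  obtain ⟨hne, -⟩ := hpre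
  match cycle with
  | [] => exact absurd rfl hne
  | h :: t =>
    set m := t.foldl min h with hm
    set i := (h :: t).idxOf m with hi
    have hm_mem : m ∈ h :: t :=
      PySem.List.min?_mem (xs := h :: t) (key := fun x => x) (m := m)
        (by rw [PySem.List.min?_id_cons])
    have hilen : i < (h :: t).length := List.idxOf_lt_length_of_mem hm_mem
    have hidx : PySem.List.index? (h :: t) m = some i := by
      rw [PySem.List.index?_eq_idxOf?, pv_idxOf?_of_mem hm_mem]
    -- A's value is the rotation at i
    have hA : validate_and_standardize_py (h :: t) =
        (h :: t).drop i ++ (h :: t).take i := by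
      unfold validate_and_standardize_py
      rw [PySem.List.min?_id_cons]
      simp only [← hm, hidx]
      by_cases h0 : i = 0
      · simp [h0]
      · rw [if_neg h0, PySem.List.slice_from_natCast, PySem.List.slice_to_natCast]
    -- B's value is the same rotation
    have hB : validate_and_standardize_py_alt (h :: t) =
        (h :: t).drop i ++ (h :: t).take i := by
      unfold validate_and_standardize_py_alt
      exact pvRotLoop_eq (h :: t).length h t hilen
    rw [hA, hB]
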